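-- pv_equiv track=rewrite | github.com/AaditiAI/Lempel_ziv_compression_technique | lempelziv.py | extract_unique_substrings
-- ===== SOURCE A (Python) =====
-- def extract_unique_substrings(file_content ):
--     unique_substrings = {}
--     n = len(file_content )
--     #Dictionary for unique substring
--     unique_substrings[file_content [0]] = '1'
--     i = 1
--     k = ""
--     current_code = 2
--     while i < n:
--         k = k + file_content [i]
--         if k not in unique_substrings:
--             unique_substrings[k] = str(current_code)
--             current_code += 1
--             k = ""
--         i += 1
--
--     return unique_substrings
-- ===== SOURCE B (Python) =====
-- def extract_unique_substrings(file_content):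
--     # LZ78 phrase dictionary via a trie (node list + child maps): O(1) per
--     # character transition, one slice per completed phrase.
--     children = [{}]                     # trie nodes: index -> {char: child index}
--     unique_substrings = {}
--     first = file_content[0]
--     children[0][first] = len(children)
--     children.append({})
--     unique_substrings[first] = '1'
--     current_code = 2
--     cur = 0
--     start = 1
--     for i in range(1, len(file_content)):
--         c = file_content[i]
--         nxt = children[cur].get(c)
--         if nxt is not None:
--             cur = nxt
--         else:
--             children[cur][c] = len(children)
--             children.append({})
--             unique_substrings[file_content[start:i + 1]] = str(current_code)
--             current_code += 1
--             cur = 0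
--             start = i + 1
--     return unique_substrings
-- ===== Notes on version B (the rewrite author's own statement) =====
-- stated objective: alternative
-- what changed: Replaces the grow-a-string-and-rehash dictionary probe with an explicit LZ78 trie (flat node list with per-node child maps): one O(1) char transition per input character and one slice per completed phrase, instead of rebuilding and rehashing a growing key string every character.
import Mathlib
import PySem

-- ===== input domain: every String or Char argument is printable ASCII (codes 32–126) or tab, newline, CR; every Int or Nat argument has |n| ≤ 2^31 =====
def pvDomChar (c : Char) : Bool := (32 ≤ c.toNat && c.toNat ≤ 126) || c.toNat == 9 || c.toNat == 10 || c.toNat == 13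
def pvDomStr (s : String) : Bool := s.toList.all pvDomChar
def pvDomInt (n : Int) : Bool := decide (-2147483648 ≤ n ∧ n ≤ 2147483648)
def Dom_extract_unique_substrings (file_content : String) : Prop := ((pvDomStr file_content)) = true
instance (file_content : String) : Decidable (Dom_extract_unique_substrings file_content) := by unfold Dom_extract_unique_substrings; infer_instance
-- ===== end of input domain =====

-- B replaces A's growing-string dictionary probe with an LZ78 trie (flat node
-- list + child maps): a genuinely different data structure; equal output proved
-- for every nonempty string (A and B both raise IndexError on "").


-- ===== PORT A =====
-- while-loop of A: state (dict, k, current_code), one step per remaining char.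
-- Python's str k is carried as List Char; String.ofList is applied exactly where
-- the Python uses the string as a dict key.
def euLoopA (d : PySem.Dict String String) (k : List Char) (code : Int) :
    List Char → PySem.Dict String String
  | [] => d
  | c :: rest =>
    let k' := k ++ [c]
    if d.contains (String.ofList k') then euLoopA d k' code rest
    else euLoopA (d.insert (String.ofList k') (PySem.Int.toStr code)) [] (code + 1) rest

def extract_unique_substrings (file_content : String) : List (String × String) :=
  match file_content.toList with
  | [] => []   -- unreachable under Pre_: Python raises IndexError on file_content[0]
  | c0 :: rest =>
    (euLoopA ((PySem.Dict.empty : PySem.Dict String String).insert (String.ofList [c0]) "1")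
      [] 2 rest).items

-- ===== PORT B =====
-- trie node list: children.getD cur is Python's children[cur] (cur is always in
-- range; the empty default is never consulted).
def euChild (nodes : List (PySem.Dict Char Nat)) (u : Nat) (c : Char) : Option Nat :=
  (nodes.getD u PySem.Dict.empty).get? c

-- for-loop of Source B: state (children, out, current_code, cur, start), index i,
-- one step per remaining char (the chars from index i onwards are `rest`).
def euLoopB (cs : List Char) (nodes : List (PySem.Dict Char Nat))
    (out : PySem.Dict String String) (code : Int) (cur start i : Nat) :
    List Char → PySem.Dict String String
  | [] => out
  | c :: rest =>
    match euChild nodes cur c with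
    | some v => euLoopB cs nodes out code v start (i + 1) rest
    | none =>
      euLoopB cs
        ((nodes.set cur ((nodes.getD cur PySem.Dict.empty).insert c nodes.length))
          ++ [PySem.Dict.empty])
        (out.insert (String.ofList (PySem.List.slice cs (some (start : Int)) (some ((i : Int) + 1))))
          (PySem.Int.toStr code))
        (code + 1) 0 (i + 1) (i + 1) rest

def extract_unique_substrings_alt (file_content : String) : List (String × String) :=
  match file_content.toList with
  | [] => []   -- unreachable under Pre_: Source B raises IndexError on file_content[0]
  | c0 :: rest =>
    (euLoopB (c0 :: rest)
      [(PySem.Dict.empty : PySem.Dict Char Nat).insert c0 1, PySem.Dict.empty]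
      ((PySem.Dict.empty : PySem.Dict String String).insert (String.ofList [c0]) "1")
      2 0 1 1 rest).items

-- ===== PRECONDITION & SPEC =====
-- A (and B) raise IndexError on the empty string (file_content[0]); Pre_ excludes exactly that input.
def Pre_extract_unique_substrings (file_content : String) : Prop := file_content ≠ ""
instance (file_content : String) : Decidable (Pre_extract_unique_substrings file_content) := by
  unfold Pre_extract_unique_substrings; infer_instance

def pvWitness_extract_unique_substrings : String := "abab"

def Spec_extract_unique_substrings (file_content : String) (out : List (String × String)) : Prop :=
  out = extract_unique_substrings_alt file_content
instance (file_content : String) (out : List (String × String)) :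
    Decidable (Spec_extract_unique_substrings file_content out) := by
  unfold Spec_extract_unique_substrings; infer_instance

-- ===== CLAIM (what is proved, stated in full; the proofs are below) =====
def Claim_equal_extract_unique_substrings : Prop :=
  ∀ (file_content : String), Dom_extract_unique_substrings file_content →
    Pre_extract_unique_substrings file_content →
    Spec_extract_unique_substrings file_content (extract_unique_substrings file_content)

-- ===== LEMMAS AND PROOFS =====

-- Walking the trie from node u along the characters of s.
def euWalk (nodes : List (PySem.Dict Char Nat)) : Nat → List Char → Option Nat
  | u, [] => some u
  | u, c :: s =>
    match euChild nodes u c with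
    | some v => euWalk nodes v s
    | none => none

-- every edge target is in range, and the root index is
def euBounded (nodes : List (PySem.Dict Char Nat)) : Prop :=
  0 < nodes.length ∧ ∀ u c v, euChild nodes u c = some v → v < nodes.length

-- the trie is a tree rooted at 0: each node is reached by at most one string
def euInj (nodes : List (PySem.Dict Char Nat)) : Prop :=
  ∀ s t u, euWalk nodes 0 s = some u → euWalk nodes 0 t = some u → s = t

-- full loop invariant relating A's dict d and B's trie
def euInv (nodes : List (PySem.Dict Char Nat)) (d : PySem.Dict String String)
    (k : List Char) (cur : Nat) : Prop :=
  euWalk nodes 0 k = some cur ∧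
  (∀ s : List Char, s ≠ [] → (d.contains (String.ofList s) = true ↔ (euWalk nodes 0 s).isSome)) ∧
  euInj nodes ∧ euBounded nodes

theorem euWalk_append (nodes : List (PySem.Dict Char Nat)) (u : Nat) (s t : List Char) :
    euWalk nodes u (s ++ t) = (euWalk nodes u s).bind (fun v => euWalk nodes v t) := by
  induction s generalizing u with
  | nil => simp [euWalk]
  | cons c s ih =>
    simp only [List.cons_append, euWalk]
    cases euChild nodes u c with
    | none => simp
    | some v => simp [ih]

theorem euWalk_lt (nodes : List (PySem.Dict Char Nat)) (hB : euBounded nodes) :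
    ∀ (s : List Char) (u w : Nat), u < nodes.length → euWalk nodes u s = some w →
      w < nodes.length := by
  intro s
  induction s with
  | nil => intro u w hu h; cases h; exact hu
  | cons c s ih =>
    intro u w hu h
    simp only [euWalk] at h
    cases hc : euChild nodes u c with
    | none => rw [hc] at h; cases h
    | some v => rw [hc] at h; exact ih v w (hB.2 u c v hc) h

theorem euChild_ext (nodes : List (PySem.Dict Char Nat)) (cur : Nat) (c : Char)
    (hcur : cur < nodes.length) (hnone : euChild nodes cur c = none) (u : Nat) (c' : Char) :
    euChild ((nodes.set cur ((nodes.getD cur PySem.Dict.empty).insert c nodes.length))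
        ++ [PySem.Dict.empty]) u c'
      = if u = cur ∧ c' = c then some nodes.length else euChild nodes u c' := by
  unfold euChild
  simp only [List.getD_eq_getElem?_getD]
  by_cases hu : u = cur
  · subst hu
    rw [List.getElem?_append_left (by simpa using hcur), List.getElem?_set_self (by simpa using hcur)]
    simp only [Option.getD_some, PySem.Dict.get?_insert]
    by_cases hc : c' = c
    · simp [hc]
    · simp [hc]
  · simp only [hu, false_and, ite_false]
    by_cases hlt : u < nodes.length
    · rw [List.getElem?_append_left (by simpa using hlt), List.getElem?_set_ne (by omega)]
    · have h1 : nodes[u]? = none := by rw [List.getElem?_eq_none_iff]; omega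
      rw [h1]
      by_cases he : u = nodes.length
      · subst he
        have h2 : (nodes.set cur ((nodes[cur]?.getD PySem.Dict.empty).insert c nodes.length)
            ++ [PySem.Dict.empty])[nodes.length]? = some PySem.Dict.empty := by
          have h3 : (nodes.set cur ((nodes[cur]?.getD PySem.Dict.empty).insert c nodes.length)
              ++ [PySem.Dict.empty])[(nodes.set cur
                ((nodes[cur]?.getD PySem.Dict.empty).insert c nodes.length)).length]?
              = some PySem.Dict.empty := List.getElem?_concat_length
          simpa using h3
        rw [h2]; simp [PySem.Dict.get?_empty]
      · have h2 : (nodes.set cur ((nodes[cur]?.getD PySem.Dict.empty).insert c nodes.length)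
            ++ [PySem.Dict.empty])[u]? = none := by
          simp only [List.getElem?_eq_none_iff, List.length_append, List.length_set,
            List.length_singleton]
          omega
        rw [h2]

-- extension lemma, forward: a walk in the extended trie is an old walk or the new phrase
theorem euWalk_ext_fwd (nodes : List (PySem.Dict Char Nat)) (cur : Nat) (c : Char)
    (hB : euBounded nodes) (hcur : cur < nodes.length) (hnone : euChild nodes cur c = none) :
    ∀ (s : List Char) (u w : Nat), u < nodes.length →
      euWalk ((nodes.set cur ((nodes.getD cur PySem.Dict.empty).insert c nodes.length))
        ++ [PySem.Dict.empty]) u s = some w →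
      (euWalk nodes u s = some w) ∨
      (∃ p, s = p ++ [c] ∧ euWalk nodes u p = some cur ∧ w = nodes.length) := by
  have hout : ∀ (m : Nat) (c'' : Char), nodes.length ≤ m → euChild nodes m c'' = none := by
    intro m c'' hm
    have : nodes[m]? = none := by rw [List.getElem?_eq_none_iff]; omega
    simp [euChild, List.getD_eq_getElem?_getD, this, PySem.Dict.get?_empty]
  intro s
  induction s with
  | nil =>
    intro u w hu h
    left; exact h
  | cons c' s ih =>
    intro u w hu h
    simp only [euWalk] at h
    rw [euChild_ext nodes cur c hcur hnone u c'] at h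
    by_cases hcase : u = cur ∧ c' = c
    · rw [if_pos hcase] at h
      -- we stepped to the fresh leaf: no further edges, so s = []
      cases s with
      | nil =>
        simp only [euWalk, Option.some.injEq] at h
        right
        exact ⟨[], by simp [hcase.2], by simp [euWalk, hcase.1], h.symm⟩
      | cons c'' s2 =>
        simp only [euWalk] at h
        rw [euChild_ext nodes cur c hcur hnone nodes.length c''] at h
        rw [if_neg (by rintro ⟨h1, -⟩; omega), hout nodes.length c'' (le_refl _)] at h
        cases h
    · rw [if_neg hcase] at h
      cases hc : euChild nodes u c' with
      | none => rw [hc] at h; cases h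
      | some v =>
        rw [hc] at h
        rcases ih v w (hB.2 u c' v hc) h with hl | ⟨p, hp1, hp2, hp3⟩
        · left; simp only [euWalk]; rw [hc]; exact hl
        · right
          exact ⟨c' :: p, by simp [hp1], by simp only [euWalk]; rw [hc]; exact hp2, hp3⟩

-- extension lemma, backward: old walks survive
theorem euWalk_ext_bwd (nodes : List (PySem.Dict Char Nat)) (cur : Nat) (c : Char)
    (hcur : cur < nodes.length) (hnone : euChild nodes cur c = none) :
    ∀ (s : List Char) (u w : Nat), euWalk nodes u s = some w →
      euWalk ((nodes.set cur ((nodes.getD cur PySem.Dict.empty).insert c nodes.length))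
        ++ [PySem.Dict.empty]) u s = some w := by
  intro s
  induction s with
  | nil => intro u w h; exact h
  | cons c' s ih =>
    intro u w h
    simp only [euWalk] at h ⊢
    cases hc : euChild nodes u c' with
    | none => rw [hc] at h; cases h
    | some v =>
      rw [hc] at h
      rw [euChild_ext nodes cur c hcur hnone u c']
      have hne : ¬(u = cur ∧ c' = c) := by
        rintro ⟨rfl, rfl⟩; rw [hnone] at hc; cases hc
      rw [if_neg hne, hc]
      exact ih v w h


-- the invariant is preserved by completing a phrase
theorem euInv_step (nodes : List (PySem.Dict Char Nat)) (d : PySem.Dict String String)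
    (k : List Char) (cur : Nat) (c : Char) (val : String)
    (hInv : euInv nodes d k cur) (hnone : euChild nodes cur c = none) :
    euInv ((nodes.set cur ((nodes.getD cur PySem.Dict.empty).insert c nodes.length))
        ++ [PySem.Dict.empty])
      (d.insert (String.ofList (k ++ [c])) val) [] 0 := by
  obtain ⟨hwalk, hmem, hinj, hB⟩ := hInv
  have hcur : cur < nodes.length := euWalk_lt nodes hB k 0 cur hB.1 hwalk
  have hlen : ((nodes.set cur ((nodes.getD cur PySem.Dict.empty).insert c nodes.length))
      ++ [PySem.Dict.empty]).length = nodes.length + 1 := by simp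
  have hofList : ∀ s t : List Char, String.ofList s = String.ofList t → s = t := by
    intro s t h
    have := congrArg String.toList h
    simpa using this
  -- the new phrase is reachable in the extended trie
  have hnew : euWalk ((nodes.set cur ((nodes.getD cur PySem.Dict.empty).insert c nodes.length))
      ++ [PySem.Dict.empty]) 0 (k ++ [c]) = some nodes.length := by
    rw [euWalk_append]
    rw [euWalk_ext_bwd nodes cur c hcur hnone k 0 cur hwalk]
    simp only [Option.bind_some, euWalk]
    rw [euChild_ext nodes cur c hcur hnone cur c, if_pos ⟨rfl, rfl⟩]
  refine ⟨rfl, ?_, ?_, ?_⟩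
  · intro s hs
    rw [PySem.Dict.contains_insert]
    constructor
    · intro h
      rcases Bool.or_eq_true_iff.mp h with h1 | h1
      · have : s = k ++ [c] := hofList _ _ (by simpa using h1)
        subst this
        rw [hnew]; rfl
      · have := (hmem s hs).mp h1
        rcases Option.isSome_iff_exists.mp this with ⟨w, hw⟩
        rw [euWalk_ext_bwd nodes cur c hcur hnone s 0 w hw]; rfl
    · intro h
      rcases Option.isSome_iff_exists.mp h with ⟨w, hw⟩
      rcases euWalk_ext_fwd nodes cur c hB hcur hnone s 0 w hB.1 hw with hl | ⟨p, hp1, hp2, _⟩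
      · refine Bool.or_eq_true_iff.mpr (Or.inr ?_)
        exact (hmem s hs).mpr (by rw [hl]; rfl)
      · have : p = k := hinj p k cur hp2 hwalk
        subst this
        refine Bool.or_eq_true_iff.mpr (Or.inl ?_)
        simp [hp1]
  · intro s t u hsu htu
    rcases euWalk_ext_fwd nodes cur c hB hcur hnone s 0 u hB.1 hsu with hl1 | ⟨p, hp1, hp2, hp3⟩ <;>
      rcases euWalk_ext_fwd nodes cur c hB hcur hnone t 0 u hB.1 htu with hl2 | ⟨q, hq1, hq2, hq3⟩
    · exact hinj s t u hl1 hl2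
    · have := euWalk_lt nodes hB s 0 u hB.1 hl1; omega
    · have := euWalk_lt nodes hB t 0 u hB.1 hl2; omega
    · have : p = q := hinj p q cur hp2 hq2
      rw [hp1, hq1, this]
  · refine ⟨by omega, ?_⟩
    intro u c' v hv
    rw [euChild_ext nodes cur c hcur hnone u c'] at hv
    by_cases hcase : u = cur ∧ c' = c
    · rw [if_pos hcase] at hv
      injection hv with hv; omega
    · rw [if_neg hcase] at hv
      have := hB.2 u c' v hv; omega

-- segment bookkeeping: k ++ [c] is the next slice
theorem euSegment (cs : List Char) (start i : Nat) (c : Char) (rest : List Char)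
    (hstart : start ≤ i) (hdrop : cs.drop i = c :: rest) :
    (cs.drop start).take (i - start) ++ [c] = (cs.drop start).take (i + 1 - start) := by
  have hdd : (cs.drop start).drop (i - start) = c :: rest := by
    rw [List.drop_drop]
    rw [show start + (i - start) = i by omega]
    exact hdrop
  have hget : (cs.drop start)[i - start]? = some c := by
    have := congrArg (fun l => l[0]?) hdd
    simpa using this
  rw [show i + 1 - start = (i - start) + 1 by omega, List.take_add_one, hget]
  rfl

-- main simulation lemma
theorem euLoop_eq (rest : List Char) : ∀ (cs : List Char) (i start : Nat)
    (d : PySem.Dict String String) (k : List Char) (code : Int)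
    (nodes : List (PySem.Dict Char Nat)) (cur : Nat),
    cs.drop i = rest → start ≤ i → k = (cs.drop start).take (i - start) →
    euInv nodes d k cur →
    euLoopA d k code rest = euLoopB cs nodes d code cur start i rest := by
  induction rest with
  | nil => intro _ _ _ _ _ _ _ _ _ _ _ _; rfl
  | cons c rest ih =>
    intro cs i start d k code nodes cur hdrop hstart hk hInv
    obtain ⟨hwalk, hmem, hinj, hB⟩ := hInv
    have hdrop' : cs.drop (i + 1) = rest := by
      rw [← List.drop_drop]
      rw [hdrop]
      rfl
    have hwalkc : euWalk nodes 0 (k ++ [c]) =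
        (euChild nodes cur c : Option Nat).bind (fun v => some v) := by
      rw [euWalk_append, hwalk]
      simp only [Option.bind_some, euWalk]
      cases euChild nodes cur c <;> rfl
    have hcontains : d.contains (String.ofList (k ++ [c])) = (euChild nodes cur c).isSome := by
      rcases hmm : euChild nodes cur c with _ | v
      · simp only [Option.isSome_none]
        by_contra hcontra
        have hc' : d.contains (String.ofList (k ++ [c])) = true := by
          cases hdc : d.contains (String.ofList (k ++ [c]))
          · rw [hdc] at hcontra; simp at hcontra
          · rfl
        have := (hmem (k ++ [c]) (by simp)).mp hc'
        rw [hwalkc, hmm] at this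
        simp at this
      · have : (euWalk nodes 0 (k ++ [c])).isSome := by rw [hwalkc, hmm]; rfl
        rw [(hmem (k ++ [c]) (by simp)).mpr this]
        rfl
    have hseg := euSegment cs start i c rest hstart hdrop
    simp only [euLoopA, euLoopB]
    rcases hmm : euChild nodes cur c with _ | v
    · -- phrase completed in both
      rw [hmm] at hcontains
      rw [if_neg (by rw [hcontains]; simp)]
      have hslice : PySem.List.slice cs (some (start : Int)) (some ((i : Int) + 1))
          = k ++ [c] := by
        rw [show ((i : Int) + 1) = ((i + 1 : Nat) : Int) by push_cast; ring,
          PySem.List.slice_natCast, hk]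
        exact hseg.symm
      rw [hslice]
      exact ih cs (i + 1) (i + 1)
        (d.insert (String.ofList (k ++ [c])) (PySem.Int.toStr code)) [] (code + 1)
        ((nodes.set cur ((nodes.getD cur PySem.Dict.empty).insert c nodes.length))
          ++ [PySem.Dict.empty]) 0
        hdrop' (le_refl _) (by simp)
        (euInv_step nodes d k cur c (PySem.Int.toStr code) ⟨hwalk, hmem, hinj, hB⟩ hmm)
    · -- transition in both
      rw [hmm] at hcontains
      rw [if_pos (by rw [hcontains]; rfl)]
      have hwalk' : euWalk nodes 0 (k ++ [c]) = some v := by rw [hwalkc, hmm]; rfl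
      exact ih cs (i + 1) start d (k ++ [c]) code nodes v hdrop'
        (by omega) (by rw [hk]; exact hseg)
        ⟨hwalk', hmem, hinj, hB⟩

-- initial invariant after the first character
theorem euInv_init (c0 : Char) :
    euInv [(PySem.Dict.empty : PySem.Dict Char Nat).insert c0 1, PySem.Dict.empty]
      ((PySem.Dict.empty : PySem.Dict String String).insert (String.ofList [c0]) "1") [] 0 := by
  have hchar : ∀ (s : List Char) (u : Nat),
      euWalk [(PySem.Dict.empty : PySem.Dict Char Nat).insert c0 1, PySem.Dict.empty] 0 s = some u →
      (s = [] ∧ u = 0) ∨ (s = [c0] ∧ u = 1) := by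
    intro s u h
    match s with
    | [] => exact Or.inl ⟨rfl, by simpa [euWalk] using h.symm⟩
    | c :: t =>
      simp only [euWalk, euChild, List.getD_eq_getElem?_getD, List.getElem?_cons_zero,
        Option.getD_some] at h
      rw [PySem.Dict.get?_insert] at h
      by_cases hc : c = c0
      · subst hc
        rw [if_pos rfl] at h
        match t with
        | [] => simp only [euWalk, Option.some.injEq] at h; exact Or.inr ⟨rfl, h.symm⟩
        | c' :: t' => simp [euWalk, euChild, PySem.Dict.get?_empty] at h
      · rw [if_neg hc] at h
        simp [PySem.Dict.get?_empty] at h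
  refine ⟨rfl, ?_, ?_, ?_⟩
  · intro s hs
    rw [PySem.Dict.contains_insert, PySem.Dict.contains_empty]
    constructor
    · intro h
      have h1 : String.ofList s = String.ofList [c0] := by simpa using h
      have h2 : s = [c0] := by
        have := congrArg String.toList h1
        simpa using this
      subst h2
      simp [euWalk, euChild, List.getD_eq_getElem?_getD]
    · intro h
      rcases Option.isSome_iff_exists.mp h with ⟨w, hw⟩
      rcases hchar s w hw with ⟨h1, -⟩ | ⟨h1, -⟩
      · exact absurd h1 hs
      · subst h1; simp
  · intro s t u hs ht
    rcases hchar s u hs with ⟨h1, h2⟩ | ⟨h1, h2⟩ <;>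
      rcases hchar t u ht with ⟨h3, h4⟩ | ⟨h3, h4⟩
    · rw [h1, h3]
    · omega
    · omega
    · rw [h1, h3]
  · refine ⟨by simp, ?_⟩
    intro u c v hv
    simp only [euChild, List.getD_eq_getElem?_getD] at hv
    match u with
    | 0 =>
      simp only [List.getElem?_cons_zero, Option.getD_some] at hv
      rw [PySem.Dict.get?_insert] at hv
      by_cases hc : c = c0
      · rw [if_pos hc] at hv; injection hv with hv; simp; omega
      · rw [if_neg hc] at hv; simp [PySem.Dict.get?_empty] at hv
    | 1 => simp [PySem.Dict.get?_empty] at hv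
    | (n + 2) => simp [PySem.Dict.get?_empty] at hv

-- ===== VERDICT (by name: the statement is the Claim_ definition above) =====
theorem extract_unique_substrings_spec : Claim_equal_extract_unique_substrings := by
  intro s _ hpre
  unfold Spec_extract_unique_substrings extract_unique_substrings extract_unique_substrings_alt
  cases hs : s.toList with
  | nil =>
    exact absurd (by simpa using congrArg String.ofList hs) hpre
  | cons c0 rest =>
    have h := euLoop_eq rest (c0 :: rest) 1 1
      ((PySem.Dict.empty : PySem.Dict String String).insert (String.ofList [c0]) "1")
      [] 2 [(PySem.Dict.empty : PySem.Dict Char Nat).insert c0 1, PySem.Dict.empty] 0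
      (by simp) (le_refl 1) (by simp) (euInv_init c0)
    dsimp only
    exact congrArg PySem.Dict.items h
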